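-- pv_equiv track=rewrite | github.com/amoghbl1/dynamic-tripwire | stats_scripts/compile_html_diff.py | clean_stat_piece
-- ===== SOURCE A (Python) =====
-- def clean_stat_piece(to_clean, start_list, in_list, is_list):
--     cleaned = []
--     for i in to_clean:
--         add_flag = True
--         if i == None:
--             add_flag = False
--         else:
--             for j in start_list:
--                 if i.startswith(j):
--                     add_flag = False
--                     break
--         if add_flag:
--             cleaned.append(i)
--     to_clean = cleaned
--     cleaned = []
--     for i in to_clean:
--         add_flag = True
--         for j in in_list:
--             if j in i:
--                 add_flag = False
--                 break
--         if add_flag: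
--             cleaned.append(i)
--     to_clean = cleaned
--     cleaned = []
--     for i in to_clean:
--         add_flag = True
--         for j in is_list:
--             if i == j:
--                 add_flag = False
--                 break
--         if add_flag:
--             cleaned.append(i)
--     return cleaned
-- ===== SOURCE B (Python) =====
-- def clean_stat_piece(to_clean, start_list, in_list, is_list):
--     # Single keep-predicate plus one comprehension, instead of three staged passes.
--     def _keep(s):
--         if s == None:
--             return False
--         if any(s.startswith(p) for p in start_list):
--             return False
--         if any(t in s for t in in_list):
--             return False
--         return all(s != e for e in is_list)
--     return [s for s in to_clean if _keep(s)]
-- ===== Notes on version B (the rewrite author's own statement) =====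
-- stated objective: simpler
-- what changed: Replaces A's three sequential filtering passes over intermediate lists with a single keep-predicate applied once per element in one comprehension.
import Mathlib
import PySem

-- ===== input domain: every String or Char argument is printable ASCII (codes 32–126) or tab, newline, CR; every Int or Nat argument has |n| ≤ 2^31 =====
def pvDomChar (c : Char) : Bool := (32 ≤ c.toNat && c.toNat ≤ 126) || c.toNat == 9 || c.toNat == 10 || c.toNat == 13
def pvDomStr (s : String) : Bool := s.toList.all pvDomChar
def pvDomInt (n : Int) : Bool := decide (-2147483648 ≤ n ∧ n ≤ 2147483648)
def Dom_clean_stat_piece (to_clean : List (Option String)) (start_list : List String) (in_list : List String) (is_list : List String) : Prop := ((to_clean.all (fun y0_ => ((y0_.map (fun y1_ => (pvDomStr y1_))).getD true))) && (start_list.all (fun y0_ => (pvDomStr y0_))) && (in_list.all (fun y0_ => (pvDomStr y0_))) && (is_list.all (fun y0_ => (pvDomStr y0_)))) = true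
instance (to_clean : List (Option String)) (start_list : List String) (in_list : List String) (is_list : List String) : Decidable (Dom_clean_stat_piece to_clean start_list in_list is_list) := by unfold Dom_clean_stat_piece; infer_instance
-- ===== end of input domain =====

-- B replaces A's three sequential filtering passes by a single keep-predicate and one pass (objective: simpler).
-- ===== PORT A =====
def clean_stat_piece (to_clean : List (Option String)) (start_list : List String) (in_list : List String) (is_list : List String) : List String :=
  -- pass 1: drop None and prefix matches (inner for-with-break over start_list = List.any)
  let cleaned1 : List String := to_clean.foldl (fun cleaned i =>
    match i with
    | none => cleaned
    | some s =>
      if start_list.any (fun j => PySem.Str.startswith s j) then cleaned else cleaned ++ [s]) []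
  -- pass 2: drop substring matches
  let cleaned2 : List String := cleaned1.foldl (fun cleaned i =>
    if in_list.any (fun j => PySem.Str.isIn j i) then cleaned else cleaned ++ [i]) []
  -- pass 3: drop exact matches
  cleaned2.foldl (fun cleaned i =>
    if is_list.any (fun j => i == j) then cleaned else cleaned ++ [i]) []

-- ===== PORT B =====
-- B's _keep predicate: the early-return chain of rejection tests (the `s == None` branch of
-- _keep is the `none` case of the match in clean_stat_piece_alt below).
def pvKeep (start_list in_list is_list : List String) (s : String) : Bool :=
  if start_list.any (fun p => PySem.Str.startswith s p) then false
  else if in_list.any (fun t => PySem.Str.isIn t s) then false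
  else is_list.all (fun e => s != e)

-- the comprehension `[s for s in to_clean if _keep(s)]`, by structural recursion
def clean_stat_piece_alt (to_clean : List (Option String)) (start_list : List String) (in_list : List String) (is_list : List String) : List String :=
  match to_clean with
  | [] => []
  | none :: rest => clean_stat_piece_alt rest start_list in_list is_list
  | some s :: rest =>
    if pvKeep start_list in_list is_list s then
      s :: clean_stat_piece_alt rest start_list in_list is_list
    else
      clean_stat_piece_alt rest start_list in_list is_list

-- ===== PRECONDITION & SPEC =====
def Spec_clean_stat_piece (to_clean : List (Option String)) (start_list : List String) (in_list : List String) (is_list : List String) (out : List String) : Prop := out = clean_stat_piece_alt to_clean start_list in_list is_list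
instance (to_clean : List (Option String)) (start_list : List String) (in_list : List String) (is_list : List String) (out : List String) : Decidable (Spec_clean_stat_piece to_clean start_list in_list is_list out) := by unfold Spec_clean_stat_piece; infer_instance

-- ===== CLAIM =====
def Claim_equal_clean_stat_piece : Prop := ∀ (to_clean : List (Option String)) (start_list : List String) (in_list : List String) (is_list : List String), Dom_clean_stat_piece to_clean start_list in_list is_list → Spec_clean_stat_piece to_clean start_list in_list is_list (clean_stat_piece to_clean start_list in_list is_list)

-- ===== LEMMAS AND PROOFS =====

-- A's pass-2/3 loop shape: foldl appending survivors = acc ++ filter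
lemma foldl_reject_filter {α : Type} (p : α → Bool) (xs : List α) (acc : List α) :
    xs.foldl (fun cleaned i => if p i then cleaned else cleaned ++ [i]) acc
      = acc ++ xs.filter (fun i => !p i) := by
  induction xs generalizing acc with
  | nil => simp
  | cons x t ih => cases h : p x <;> simp [h, ih]

-- A's pass-1 loop, abstracting the rejection predicate
lemma foldl_pass1 (c1 : String → Bool) (xs : List (Option String)) (acc : List String) :
    xs.foldl (fun cleaned i =>
      match i with
      | none => cleaned
      | some s => if c1 s then cleaned else cleaned ++ [s]) acc
      = acc ++ xs.filterMap (fun i =>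
          match i with
          | none => none
          | some s => if c1 s then none else some s) := by
  induction xs generalizing acc with
  | nil => simp
  | cons x t ih =>
    cases x with
    | none => simpa using ih acc
    | some s => cases h : c1 s <;> simp [h, ih]

-- composing A's three passes on a cons
-- Bool bridge: `all (s != ·)` is the negation of `any (s == ·)`
lemma all_bne_eq_not_any_beq (is_list : List String) (s : String) :
    (is_list.all fun e => s != e) = !(is_list.any fun j => s == j) := by
  have hfun : (fun e : String => !(s != e)) = (fun e : String => s == e) := by
    funext e; simp [bne]
  rw [List.all_eq_not_any_not, hfun]

-- composing A's three passes yields B's single recursion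
lemma composed_eq_alt (start_list in_list is_list : List String) (xs : List (Option String)) :
    List.filter (fun i => !(is_list.any (fun j => i == j)))
      (List.filter (fun i => !(in_list.any (fun j => PySem.Str.isIn j i)))
        (xs.filterMap (fun i =>
          match i with
          | none => none
          | some s => if start_list.any (fun j => PySem.Str.startswith s j) then none else some s)))
      = clean_stat_piece_alt xs start_list in_list is_list := by
  induction xs with
  | nil => rfl
  | cons x t ih =>
    cases x with
    | none => simpa only [List.filterMap_cons, clean_stat_piece_alt] using ih
    | some s =>
      simp only [List.filterMap_cons, clean_stat_piece_alt]
      rcases Bool.eq_false_or_eq_true (start_list.any (fun j => PySem.Str.startswith s j)) with h1 | h1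
      · -- starts with some prefix: rejected by A's pass 1 and by pvKeep
        have hk : pvKeep start_list in_list is_list s = false := by
          unfold pvKeep; rw [if_pos h1]
        rw [if_pos h1, hk, if_neg (by simp)]
        exact ih
      · have hne1 : ¬ ((start_list.any fun j => PySem.Str.startswith s j) = true) := by
          rw [h1]; exact Bool.false_ne_true
        rw [if_neg hne1, List.filter_cons]
        rcases Bool.eq_false_or_eq_true (in_list.any (fun j => PySem.Str.isIn j s)) with h2 | h2
        · -- contains a forbidden substring: rejected by A's pass 2 and by pvKeep
          have hk : pvKeep start_list in_list is_list s = false := by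
            unfold pvKeep; rw [if_neg hne1, if_pos h2]
          have hcond : ¬ ((!(in_list.any fun j => PySem.Str.isIn j s)) = true) := by
            rw [h2]; decide
          rw [if_neg hcond, hk, if_neg (by simp)]
          exact ih
        · have hcond : ((!(in_list.any fun j => PySem.Str.isIn j s)) = true) := by rw [h2]; rfl
          have hne2 : ¬ ((in_list.any fun j => PySem.Str.isIn j s) = true) := by
            rw [h2]; exact Bool.false_ne_true
          rw [if_pos hcond, List.filter_cons]
          rcases Bool.eq_false_or_eq_true (is_list.any (fun j => s == j)) with h3 | h3
          · -- equals a forbidden string: rejected by A's pass 3 and by pvKeep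
            have hk : pvKeep start_list in_list is_list s = false := by
              unfold pvKeep
              rw [if_neg hne1, if_neg hne2, all_bne_eq_not_any_beq, h3]; rfl
            have hcond3 : ¬ ((!(is_list.any fun j => s == j)) = true) := by
              rw [h3]; decide
            rw [if_neg hcond3, hk, if_neg (by simp)]
            exact ih
          · -- survivor: kept by all three passes and by pvKeep
            have hk : pvKeep start_list in_list is_list s = true := by
              unfold pvKeep
              rw [if_neg hne1, if_neg hne2, all_bne_eq_not_any_beq, h3]; rfl
            have hcond3 : ((!(is_list.any fun j => s == j)) = true) := by rw [h3]; rfl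
            rw [if_pos hcond3, hk, if_pos rfl, ih]

-- ===== VERDICT =====
theorem clean_stat_piece_spec : Claim_equal_clean_stat_piece := by
  intro to_clean start_list in_list is_list _
  unfold Spec_clean_stat_piece clean_stat_piece
  rw [foldl_pass1, foldl_reject_filter, foldl_reject_filter, List.nil_append,
    List.nil_append, List.nil_append]
  exact composed_eq_alt start_list in_list is_list to_clean
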